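-- pv_equiv track=rewrite | github.com/Ye-eun-Kim/codingTest | 백준/Silver/1051. 숫자 정사각형/숫자 정사각형.py | search
-- ===== SOURCE A (Python) =====
-- def search(value, i, j, graph, n, m):
--     temp = []
--     len_max = 0
--     for y in range(j+1, m):
--         if graph[i][y] == value:
--             # 길이를 저장
--             temp.append(y-j)
--     for length in temp:
--         x = i+length
--         if x >= n:
--             continue
--         if graph[x][j] == value:
--             if graph[x][j+length] == value:
--                 len_max = length
--
--     return len_max+1
-- ===== SOURCE B (Python) =====
-- def search(value, i, j, graph, n, m):
--     # Scan side-lengths from the largest feasible down, return on first full match.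
--     for length in range(min(n - i, m - j) - 1, 0, -1):
--         if (graph[i][j + length] == value
--                 and graph[i + length][j] == value
--                 and graph[i + length][j + length] == value):
--             return length + 1
--     return 1
-- ===== Notes on version B (the rewrite author's own statement) =====
-- stated objective: simpler
-- what changed: B drops A's build-candidate-list-then-validate two-pass structure and instead scans side lengths downward from the largest feasible one, checking all three remaining corners together and returning on the first full match (largest wins by construction).
-- outside the precondition, e.g. on search(1, -1, 0, [[1, 1], [1, 1]], 2, 2): A returns 2, B returns 2; on search(5, 0, 0, [[5, 5], [5, 5], [5, 5]], 2, 2): A returns 2, B returns 2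
import Mathlib
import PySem

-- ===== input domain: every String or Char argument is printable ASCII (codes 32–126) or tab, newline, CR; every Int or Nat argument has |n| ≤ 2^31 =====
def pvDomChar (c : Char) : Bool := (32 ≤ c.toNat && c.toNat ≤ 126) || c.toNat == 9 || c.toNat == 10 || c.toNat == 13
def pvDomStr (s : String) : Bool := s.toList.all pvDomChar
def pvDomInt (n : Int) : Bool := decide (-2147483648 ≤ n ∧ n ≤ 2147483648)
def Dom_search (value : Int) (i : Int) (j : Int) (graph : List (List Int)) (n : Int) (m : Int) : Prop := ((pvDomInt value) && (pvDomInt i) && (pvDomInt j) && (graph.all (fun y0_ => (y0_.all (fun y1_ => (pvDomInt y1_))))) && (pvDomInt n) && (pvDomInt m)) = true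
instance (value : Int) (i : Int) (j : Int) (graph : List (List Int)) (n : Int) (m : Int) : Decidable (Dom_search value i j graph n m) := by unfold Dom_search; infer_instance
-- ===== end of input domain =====

-- B replaces A's build-candidates-then-validate two passes with one downward scan with
-- early exit; same cost, shorter; return-value equivalence is proved on Pre_search below.

-- ===== PORT A =====
def search (value : Int) (i : Int) (j : Int) (graph : List (List Int)) (n : Int) (m : Int) : Int :=
  let temp := (PySem.List.pyRange (j+1) m 1).foldl
    (fun acc y =>
      if PySem.List.pyGetD (PySem.List.pyGetD graph i []) y 0 = value then acc ++ [y - j] else acc) []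
  let len_max := temp.foldl
    (fun lm length =>
      let x := i + length
      if x ≥ n then lm
      else if PySem.List.pyGetD (PySem.List.pyGetD graph x []) j 0 = value then
        (if PySem.List.pyGetD (PySem.List.pyGetD graph x []) (j + length) 0 = value then length else lm)
      else lm) 0
  len_max + 1

-- ===== PORT B =====
def altCheck (value : Int) (i : Int) (j : Int) (graph : List (List Int)) (length : Int) : Bool :=
  decide (PySem.List.pyGetD (PySem.List.pyGetD graph i []) (j + length) 0 = value) &&
  decide (PySem.List.pyGetD (PySem.List.pyGetD graph (i + length) []) j 0 = value) &&
  decide (PySem.List.pyGetD (PySem.List.pyGetD graph (i + length) []) (j + length) 0 = value)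

def altLoop (value : Int) (i : Int) (j : Int) (graph : List (List Int)) : List Int → Int
  | [] => 1
  | length :: rest =>
    if altCheck value i j graph length then length + 1 else altLoop value i j graph rest

def search_alt (value : Int) (i : Int) (j : Int) (graph : List (List Int)) (n : Int) (m : Int) : Int :=
  altLoop value i j graph (PySem.List.pyRange (min (n - i) (m - j) - 1) 0 (-1))

-- ===== PRECONDITION & SPEC =====
-- Pre_ restricts to the natural grid domain (0 ≤ i < n = row count, 0 ≤ j < m, rectangular
-- rows of width m), plus the access-free case m ≤ j+1; outside it A either raises an
-- IndexError or returns only via negative-index wraparound / rows its loops never reach.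
def Pre_search (value : Int) (i : Int) (j : Int) (graph : List (List Int)) (n : Int) (m : Int) : Prop :=
  m ≤ j + 1 ∨
    (n = (graph.length : Int) ∧ 0 ≤ i ∧ i < n ∧ 0 ≤ j ∧ j + 1 < m ∧
      ∀ row ∈ graph, (row.length : Int) = m)
instance (value : Int) (i : Int) (j : Int) (graph : List (List Int)) (n : Int) (m : Int) : Decidable (Pre_search value i j graph n m) := by unfold Pre_search; infer_instance

def pvWitness_search : Int × Int × Int × List (List Int) × Int × Int := (1, 0, 0, [[1, 1], [1, 1]], 2, 2)

def Spec_search (value : Int) (i : Int) (j : Int) (graph : List (List Int)) (n : Int) (m : Int) (out : Int) : Prop := out = search_alt value i j graph n m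
instance (value : Int) (i : Int) (j : Int) (graph : List (List Int)) (n : Int) (m : Int) (out : Int) : Decidable (Spec_search value i j graph n m out) := by unfold Spec_search; infer_instance

-- ===== CLAIM (what is proved, stated in full; the proofs are below) =====
def Claim_equal_search : Prop := ∀ (value : Int) (i : Int) (j : Int) (graph : List (List Int)) (n : Int) (m : Int), Dom_search value i j graph n m → Pre_search value i j graph n m → Spec_search value i j graph n m (search value i j graph n m)

-- ===== LEMMAS AND PROOFS =====

-- last match over [1..k] (A's ascending overwrite), as a downward recursion
def bestDown (S : Int → Bool) : Nat → Int
  | 0 => 0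
  | k+1 => if S ((k : Int) + 1) then (k : Int) + 1 else bestDown S k

theorem bestDown_congr (S S' : Int → Bool) (k : Nat)
    (h : ∀ t : Nat, 1 ≤ t → t ≤ k → S t = S' t) : bestDown S k = bestDown S' k := by
  induction k with
  | zero => rfl
  | succ k ih =>
    have h1 : S ((k : Int) + 1) = S' ((k : Int) + 1) := by
      have := h (k+1) (by omega) (by omega); push_cast at this ⊢; exact this
    simp only [bestDown, h1]
    exact if_congr Iff.rfl rfl (ih fun t h1 h2 => h t h1 (by omega))

theorem bestDown_drop (S : Int → Bool) (k K : Nat) (hK : K ≤ k)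
    (h : ∀ t : Nat, K < t → t ≤ k → S t = false) : bestDown S k = bestDown S K := by
  induction k with
  | zero => have : K = 0 := by omega
            rw [this]
  | succ k ih =>
    rcases Nat.eq_or_lt_of_le hK with h1 | h1
    · rw [h1]
    · have hf : S ((k : Int) + 1) = false := by
        have := h (k+1) (by omega) (by omega); push_cast at this ⊢; exact this
      simp only [bestDown, hf]
      simp only [Bool.false_eq_true, if_false]
      exact ih (by omega) fun t h1 h2 => h t h1 (by omega)

-- B's loop over a countdown range computes bestDown + 1
theorem altLoop_pyRange (value i j : Int) (graph : List (List Int)) (k : Nat) :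
    altLoop value i j graph (PySem.List.pyRange (k : Int) 0 (-1)) =
      bestDown (fun t => altCheck value i j graph t) k + 1 := by
  induction k with
  | zero => simp [PySem.List.pyRange_neg_one_eq_nil, altLoop, bestDown]
  | succ k ih =>
    rw [PySem.List.pyRange_neg_one_cons (by push_cast; omega)]
    push_cast
    simp only [altLoop, bestDown]
    split <;> simp_all

-- last-match fold over a filtered list = fold with conjoined test
theorem foldl_last_filter (Q : Int → Bool) (f : Int → Int) (p : Int → Bool) (l : List Int) (a : Int) :
    (l.filter p).foldl (fun lm y => if Q y then f y else lm) a =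
      l.foldl (fun lm y => if p y && Q y then f y else lm) a := by
  induction l generalizing a with
  | nil => rfl
  | cons x xs ih =>
    by_cases hp : p x
    · by_cases hq : Q x <;> simp [List.filter, hp, hq, ih]
    · simp [List.filter, hp, ih]

-- last-match fold over an ascending range of lengths = bestDown
theorem foldl_last_pyRange (j : Int) (T : Int → Bool) (k : Nat) :
    (PySem.List.pyRange (j+1) (j+1+(k : Int)) 1).foldl
        (fun lm y => if T y then y - j else lm) 0 =
      bestDown (fun t => T (j + t)) k := by
  induction k with
  | zero => simp [PySem.List.pyRange_one_eq_nil, bestDown]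
  | succ k ih =>
    have hsplit : PySem.List.pyRange (j+1) (j+1+((k : Int)+1)) 1 =
        PySem.List.pyRange (j+1) (j+1+(k : Int)) 1 ++ [j+1+(k : Int)] := by
      have := PySem.List.pyRange_one_succ_right (a := j+1) (b := j+1+(k : Int)) (by omega)
      rw [← this]; ring_nf
    push_cast
    rw [hsplit, List.foldl_append]
    simp only [List.foldl, bestDown, ih]
    have harg : j + ((k : Int) + 1) = j + 1 + (k : Int) := by ring
    by_cases hT : T (j + 1 + (k : Int))
    · simp only [harg, hT, if_true]; ring
    · simp only [harg, hT]
      simp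

-- ===== VERDICT (by name: the statement is the Claim_ definition above) =====
theorem search_spec : Claim_equal_search := by
  intro value i j graph n m _ hpre
  show search value i j graph n m = search_alt value i j graph n m
  rcases hpre with h | ⟨hn, hi0, hin, hj0, hjm, hrect⟩
  · -- m ≤ j+1 : both loops are empty
    rw [search, search_alt]
    rw [PySem.List.pyRange_one_eq_nil (by omega),
        PySem.List.pyRange_neg_one_eq_nil (by omega)]
    rfl
  · -- the rectangular case
    -- abbreviations for the three corner tests
    set p1 : Int → Bool := fun y =>
      decide (PySem.List.pyGetD (PySem.List.pyGetD graph i []) y 0 = value) with hp1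
    set QA : Int → Bool := fun ℓ =>
      decide (i + ℓ < n) &&
      (decide (PySem.List.pyGetD (PySem.List.pyGetD graph (i + ℓ) []) j 0 = value) &&
       decide (PySem.List.pyGetD (PySem.List.pyGetD graph (i + ℓ) []) (j + ℓ) 0 = value)) with hQA
    -- A's value
    have hA : search value i j graph n m =
        (PySem.List.pyRange (j+1) m 1).foldl
          (fun lm y => if p1 y && QA (y - j) then y - j else lm) 0 + 1 := by
      rw [search]
      rw [PySem.List.foldl_append_ite]
      simp only [List.nil_append]
      rw [List.foldl_map]
      have hbody : (fun (lm y : Int) =>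
          (fun lm length =>
            let x := i + length
            if x ≥ n then lm
            else if PySem.List.pyGetD (PySem.List.pyGetD graph x []) j 0 = value then
              (if PySem.List.pyGetD (PySem.List.pyGetD graph x []) (j + length) 0 = value then length else lm)
            else lm) lm (y - j)) =
          (fun lm y => if QA (y - j) then y - j else lm) := by
        funext lm y
        simp only [hQA, Bool.and_eq_true, decide_eq_true_eq]
        split_ifs <;> simp_all <;> omega
      rw [hbody, foldl_last_filter (fun y => QA (y - j)) (fun y => y - j)]
    -- number of candidate lengths on each side
    set KA : Nat := (m - (j+1)).toNat with hKA
    have hmKA : m = j + 1 + (KA : Int) := by omega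
    set K : Nat := (min (n - i) (m - j) - 1).toNat with hK
    have hKle : K ≤ KA := by omega
    -- B's value
    have hB : search_alt value i j graph n m =
        bestDown (fun t => altCheck value i j graph t) K + 1 := by
      rw [search_alt]
      by_cases hpos : 1 ≤ min (n - i) (m - j) - 1
      · rw [show min (n - i) (m - j) - 1 = (K : Int) by omega]
        exact altLoop_pyRange value i j graph K
      · rw [PySem.List.pyRange_neg_one_eq_nil (by omega)]
        have : K = 0 := by omega
        rw [this]; rfl
    rw [hA, hB, hmKA, foldl_last_pyRange j (fun y => p1 y && QA (y - j)) KA]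
    have hsimp : ∀ t : Int, (fun t => p1 (j + t) && QA (j + t - j)) t =
        (fun t => p1 (j + t) && QA t) t := by
      intro t; simp only []; rw [show j + t - j = t by ring]
    rw [funext hsimp]
    congr 1
    rw [bestDown_drop (fun t => p1 (j + t) && QA t) KA K hKle
        (by
          intro t h1 h2
          have hge : n ≤ i + (t : Int) := by omega
          simp only [hQA, Bool.and_eq_true]
          simp [show ¬ (i + (t : Int) < n) by omega])]
    apply bestDown_congr
    intro t h1 h2
    have hlt : i + (t : Int) < n := by omega
    simp only [hp1, hQA, altCheck]
    simp [show i + (t : Int) < n from hlt, Bool.and_assoc]
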